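-- pv_equiv track=rewrite | github.com/leegenes/topspot | playlister.py | compareOldAndNew
-- ===== SOURCE A (Python) =====
-- def compareOldAndNew(current, update):
-- 	to_remove = current
-- 	to_add = []
-- 	for uri in update:
-- 		if uri not in current:
-- 			to_add.append(uri)
-- 		else:
-- 			to_remove.remove(uri)
-- 	return to_add, to_remove
-- ===== SOURCE B (Python) =====
-- def compareOldAndNew(current, update):
-- 	# Counter-based: count occurrences once, then decide each element by its
-- 	# occurrence index -- no inner membership scans or list.remove calls.
-- 	# Mutates current in place (current[:] = survivors) exactly as A does, and
-- 	# returns that same list object.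
-- 	cur_count = {}
-- 	for x in current:
-- 		cur_count[x] = cur_count.get(x, 0) + 1
-- 	to_add = []
-- 	seen = {}
-- 	for u in update:
-- 		s = seen.get(u, 0)
-- 		if s >= cur_count.get(u, 0):
-- 			to_add.append(u)
-- 		seen[u] = s + 1
-- 	survivors = []
-- 	taken = {}
-- 	for x in current:
-- 		j = taken.get(x, 0)
-- 		if j >= min(cur_count.get(x, 0), seen.get(x, 0)):
-- 			survivors.append(x)
-- 		taken[x] = j + 1
-- 	current[:] = survivors
-- 	return to_add, current
-- ===== Notes on version B (the rewrite author's own statement) =====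
-- stated objective: faster
-- what changed: Replaces the interleaved membership-scan-and-list.remove loop by three counting passes: build an occurrence counter of current, classify each update element by its occurrence index against that counter, then rebuild current skipping the first min(count_current, count_update) occurrences of each value.
import Mathlib
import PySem

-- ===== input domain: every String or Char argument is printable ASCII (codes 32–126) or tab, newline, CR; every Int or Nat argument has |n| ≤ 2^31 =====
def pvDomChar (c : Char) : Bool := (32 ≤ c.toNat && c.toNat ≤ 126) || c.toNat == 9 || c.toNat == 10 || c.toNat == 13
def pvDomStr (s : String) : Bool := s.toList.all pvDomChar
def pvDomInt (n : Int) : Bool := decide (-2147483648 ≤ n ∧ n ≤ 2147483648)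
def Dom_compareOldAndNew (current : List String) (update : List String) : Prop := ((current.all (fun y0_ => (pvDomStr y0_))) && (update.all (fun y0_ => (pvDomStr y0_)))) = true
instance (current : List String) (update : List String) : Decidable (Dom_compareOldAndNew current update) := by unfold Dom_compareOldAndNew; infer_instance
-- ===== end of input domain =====

-- B replaces A's interleaved membership-scan/list.remove loop by three counting
-- passes over the lists (asymptotically faster); both mutate `current` in place to
-- the same final contents and the equivalence proved here is about the return value.


-- ===== PORT A =====
-- A's loop: `to_remove` aliases `current`, so the membership test and the removal
-- act on the same (shrinking) list; the `else` branch only runs when `u ∈ cur`,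
-- so `remove?` is `some` there and `.getD cur` never falls back (no ValueError).
def pyALoop : List String → List String → List String → List String × List String
  | ta, cur, [] => (ta, cur)
  | ta, cur, u :: rest =>
      if cur.contains u = false then pyALoop (ta ++ [u]) cur rest
      else pyALoop ta ((PySem.List.remove? cur u).getD cur) rest

def compareOldAndNew (current : List String) (update : List String) : List String × List String :=
  pyALoop [] current update

-- ===== PORT B =====
-- second loop of Source B: classify update elements by occurrence index vs cur_count
def pyBAdd : PySem.Dict String Int → List String → PySem.Dict String Int → List String → List String × PySem.Dict String Int
  | _, ta, seen, [] => (ta, seen)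
  | cc, ta, seen, u :: rest =>
      let s := seen.getD u 0
      pyBAdd cc (if s ≥ cc.getD u 0 then ta ++ [u] else ta) (seen.insert u (s + 1)) rest

-- third loop of Source B: keep x unless its occurrence index is below min(cur_count, seen)
def pyBKeep : PySem.Dict String Int → PySem.Dict String Int → List String → PySem.Dict String Int → List String → List String
  | _, _, sv, _, [] => sv
  | cc, seen, sv, taken, x :: rest =>
      let j := taken.getD x 0
      pyBKeep cc seen (if j ≥ min (cc.getD x 0) (seen.getD x 0) then sv ++ [x] else sv) (taken.insert x (j + 1)) rest

def compareOldAndNew_alt (current : List String) (update : List String) : List String × List String :=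
  let cc := current.foldl (fun d x => d.insert x (d.getD x 0 + 1)) PySem.Dict.empty
  let p := pyBAdd cc [] PySem.Dict.empty update
  let survivors := pyBKeep cc p.2 [] PySem.Dict.empty current
  (p.1, survivors)

-- ===== PRECONDITION & SPEC =====
def Spec_compareOldAndNew (current : List String) (update : List String) (out : List String × List String) : Prop := out = compareOldAndNew_alt current update
instance (current : List String) (update : List String) (out : List String × List String) : Decidable (Spec_compareOldAndNew current update out) := by unfold Spec_compareOldAndNew; infer_instance

-- ===== CLAIM (what is proved, stated in full; the proofs are below) =====
def Claim_equal_compareOldAndNew : Prop := ∀ (current : List String) (update : List String), Dom_compareOldAndNew current update → Spec_compareOldAndNew current update (compareOldAndNew current update)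

-- ===== LEMMAS AND PROOFS =====

-- bump a Nat-valued multiplicity function at u
def incF (f : String → Nat) (u : String) : String → Nat := fun v => if v = u then f v + 1 else f v

-- drop, for every value v, the first (r v) occurrences of v from the list
def dropOcc : List String → (String → Nat) → List String
  | [], _ => []
  | x :: xs, r => if 0 < r x then dropOcc xs (fun v => if v = x then r v - 1 else r v) else x :: dropOcc xs r

-- pure reference of B's second loop: emit u when its occurrence index reached cc u
def addRec (cc : String → Nat) : List String → (String → Nat) → List String
  | [], _ => []
  | u :: rest, seen => (if cc u ≤ seen u then [u] else []) ++ addRec cc rest (incF seen u)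

-- pure reference of B's third loop: keep x when its occurrence index reached m x
def keepRec (m : String → Nat) : List String → (String → Nat) → List String
  | [], _ => []
  | x :: rest, taken => (if m x ≤ taken x then [x] else []) ++ keepRec m rest (incF taken x)

theorem count_dropOcc (l : List String) : ∀ (r : String → Nat) (v : String),
    (dropOcc l r).count v = l.count v - r v := by
  induction l with
  | nil => intro r v; simp [dropOcc]
  | cons x xs ih =>
    intro r v
    by_cases hx : 0 < r x
    · rw [dropOcc, if_pos hx, ih]
      by_cases hv : v = x
      · subst hv; simp; omega
      · simp [hv, Ne.symm hv]
    · rw [dropOcc, if_neg hx]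
      by_cases hv : v = x
      · subst hv; simp [ih]; omega
      · simp [hv, Ne.symm hv, ih]

theorem remove?_dropOcc (l : List String) : ∀ (r : String → Nat) (u : String),
    r u < l.count u → PySem.List.remove? (dropOcc l r) u = some (dropOcc l (incF r u)) := by
  induction l with
  | nil => intro r u h; simp at h
  | cons x xs ih =>
    intro r u h
    by_cases hx : 0 < r x
    · have hx' : 0 < incF r u x := by unfold incF; split <;> omega
      rw [dropOcc, if_pos hx, dropOcc, if_pos hx']
      have hfe : (fun v => if v = x then incF r u v - 1 else incF r u v)
          = incF (fun v => if v = x then r v - 1 else r v) u := by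
        funext v
        by_cases hvx : v = x
        · subst hvx
          by_cases hvu : v = u
          · subst hvu; simp [incF]; omega
          · simp [incF, hvu]
        · by_cases hvu : v = u
          · subst hvu; simp [incF, hvx]
          · simp [incF, hvx, hvu]
      rw [hfe]
      apply ih
      by_cases hux : u = x
      · subst hux; simp at h ⊢; omega
      · simp [hux] at h ⊢; simpa [Ne.symm hux] using h
    · rw [dropOcc, if_neg hx]
      by_cases hux : x = u
      · subst hux
        rw [PySem.List.remove?_cons_self]
        have hx1 : 0 < incF r x x := by unfold incF; simp
        rw [dropOcc, if_pos hx1]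
        have hfe : (fun v => if v = x then incF r x v - 1 else incF r x v) = r := by
          funext v; unfold incF; by_cases hvx : v = x <;> simp [hvx]
        rw [hfe]
      · rw [PySem.List.remove?_cons_of_ne (dropOcc xs r) hux]
        have h' : r u < xs.count u := by
          simpa [hux] using h
        rw [ih r u h']
        have hx0 : ¬ 0 < incF r u x := by unfold incF; simp [hux]; omega
        rw [dropOcc, if_neg hx0]
        simp

theorem dropOcc_zero (l : List String) : dropOcc l (fun _ => 0) = l := by
  induction l with
  | nil => rfl
  | cons x xs ih => rw [dropOcc, if_neg (by omega), ih]

theorem contains_dropOcc_iff (l : List String) (r : String → Nat) (u : String) :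
    (dropOcc l r).contains u = true ↔ r u < l.count u := by
  rw [List.contains_iff_mem, ← List.count_pos_iff, count_dropOcc]
  omega

theorem pyALoop_eq (c0 : List String) : ∀ (rest ta : List String) (seen : String → Nat),
    pyALoop ta (dropOcc c0 (fun v => min (c0.count v) (seen v))) rest
      = (ta ++ addRec (fun v => c0.count v) rest seen,
         dropOcc c0 (fun v => min (c0.count v) (seen v + rest.count v))) := by
  intro rest
  induction rest with
  | nil =>
    intro ta seen
    simp [pyALoop, addRec]
  | cons u rest ih =>
    intro ta seen
    by_cases h : seen u < c0.count u
    · -- u still present: A removes it, B's reference does not emit it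
      have hc : (dropOcc c0 (fun v => min (c0.count v) (seen v))).contains u = true := by
        rw [contains_dropOcc_iff]; omega
      rw [pyALoop, if_neg (by rw [hc]; simp)]
      rw [remove?_dropOcc c0 _ u (by simp; omega)]
      have hfe : incF (fun v => min (c0.count v) (seen v)) u
          = (fun v => min (c0.count v) (incF seen u v)) := by
        funext v; unfold incF; by_cases hvu : v = u <;> simp [hvu] <;> omega
      rw [Option.getD_some, hfe, ih ta (incF seen u)]
      have hadd : addRec (fun v => c0.count v) (u :: rest) seen
          = addRec (fun v => c0.count v) rest (incF seen u) := by
        rw [addRec, if_neg (by omega)]; simp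
      have hcnt : (fun v => min (c0.count v) (incF seen u v + rest.count v))
          = (fun v => min (c0.count v) (seen v + (u :: rest).count v)) := by
        funext v; unfold incF
        by_cases hvu : v = u
        · subst hvu; simp; omega
        · simp [hvu, Ne.symm hvu]
      rw [hadd, hcnt]
    · -- u absent: A appends to to_add, state unchanged
      have hc : (dropOcc c0 (fun v => min (c0.count v) (seen v))).contains u = false := by
        have h2 := contains_dropOcc_iff c0 (fun v => min (c0.count v) (seen v)) u
        rcases Bool.eq_false_or_eq_true ((dropOcc c0 (fun v => min (c0.count v) (seen v))).contains u) with h3 | h3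
        · exact absurd (h2.mp h3) (by simp; omega)
        · exact h3
      rw [pyALoop, if_pos hc]
      have hfe : (fun v => min (c0.count v) (seen v))
          = (fun v => min (c0.count v) (incF seen u v)) := by
        funext v; unfold incF; by_cases hvu : v = u <;> simp [hvu] <;> omega
      rw [hfe, ih (ta ++ [u]) (incF seen u)]
      have hadd : addRec (fun v => c0.count v) (u :: rest) seen
          = u :: addRec (fun v => c0.count v) rest (incF seen u) := by
        rw [addRec, if_pos (by omega)]; simp
      have hcnt : (fun v => min (c0.count v) (incF seen u v + rest.count v))
          = (fun v => min (c0.count v) (seen v + (u :: rest).count v)) := by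
        funext v; unfold incF
        by_cases hvu : v = u
        · subst hvu; simp; omega
        · simp [hvu, Ne.symm hvu]
      rw [hadd, hcnt]
      simp

theorem dropOcc_eq_keepRec (m : String → Nat) : ∀ (l : List String) (taken : String → Nat),
    dropOcc l (fun v => m v - taken v) = keepRec m l taken := by
  intro l
  induction l with
  | nil => intro taken; rfl
  | cons x xs ih =>
    intro taken
    by_cases h : m x ≤ taken x
    · rw [dropOcc, if_neg (by omega), keepRec, if_pos h]
      have hfe : (fun v => m v - taken v) = (fun v => m v - incF taken x v) := by
        funext v; unfold incF; by_cases hvx : v = x <;> simp [hvx] <;> omega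
      rw [hfe, ih]
      simp
    · rw [dropOcc, if_pos (by omega), keepRec, if_neg h]
      have hfe : (fun v => if v = x then m v - taken v - 1 else m v - taken v)
          = (fun v => m v - incF taken x v) := by
        funext v; unfold incF; by_cases hvx : v = x <;> simp [hvx] <;> omega
      rw [hfe, ih]
      simp

theorem pyBAdd_eq (cc : PySem.Dict String Int) (ccf : String → Nat)
    (hcc : ∀ v, cc.getD v 0 = (ccf v : Int)) :
    ∀ (rest ta : List String) (seen : PySem.Dict String Int) (sf : String → Nat),
    (∀ v, seen.getD v 0 = (sf v : Int)) →
    (pyBAdd cc ta seen rest).1 = ta ++ addRec ccf rest sf ∧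
    (∀ v, (pyBAdd cc ta seen rest).2.getD v 0 = ((sf v + rest.count v : Nat) : Int)) := by
  intro rest
  induction rest with
  | nil =>
    intro ta seen sf hs
    refine ⟨by simp [pyBAdd, addRec], fun v => by simp [pyBAdd, hs v]⟩
  | cons u rest ih =>
    intro ta seen sf hs
    have hs' : ∀ v, (seen.insert u (seen.getD u 0 + 1)).getD v 0 = (incF sf u v : Int) := by
      intro v
      rw [PySem.Dict.getD_insert]
      unfold incF
      by_cases hvu : v = u <;> simp [hvu, hs u, hs v]
    have hcond : (seen.getD u 0 ≥ cc.getD u 0) ↔ ccf u ≤ sf u := by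
      rw [hs u, hcc u]; exact_mod_cast Iff.rfl
    by_cases h : ccf u ≤ sf u
    · have := ih (ta ++ [u]) (seen.insert u (seen.getD u 0 + 1)) (incF sf u) hs'
      refine ⟨?_, fun v => ?_⟩
      · rw [pyBAdd, if_pos (hcond.mpr h)]
        rw [this.1, addRec, if_pos h]
        simp
      · rw [pyBAdd, if_pos (hcond.mpr h)]
        rw [this.2 v]
        unfold incF
        by_cases hvu : v = u
        · subst hvu; simp; omega
        · simp [hvu, Ne.symm hvu]
    · have := ih ta (seen.insert u (seen.getD u 0 + 1)) (incF sf u) hs'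
      refine ⟨?_, fun v => ?_⟩
      · rw [pyBAdd, if_neg (fun hge => h (hcond.mp hge))]
        rw [this.1, addRec, if_neg h]
        simp
      · rw [pyBAdd, if_neg (fun hge => h (hcond.mp hge))]
        rw [this.2 v]
        unfold incF
        by_cases hvu : v = u
        · subst hvu; simp; omega
        · simp [hvu, Ne.symm hvu]

theorem pyBKeep_eq (cc seen : PySem.Dict String Int) (ccf sef : String → Nat)
    (hcc : ∀ v, cc.getD v 0 = (ccf v : Int)) (hse : ∀ v, seen.getD v 0 = (sef v : Int)) :
    ∀ (rest sv : List String) (taken : PySem.Dict String Int) (tf : String → Nat),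
    (∀ v, taken.getD v 0 = (tf v : Int)) →
    pyBKeep cc seen sv taken rest = sv ++ keepRec (fun v => min (ccf v) (sef v)) rest tf := by
  intro rest
  induction rest with
  | nil => intro sv taken tf ht; simp [pyBKeep, keepRec]
  | cons x rest ih =>
    intro sv taken tf ht
    have ht' : ∀ v, (taken.insert x (taken.getD x 0 + 1)).getD v 0 = (incF tf x v : Int) := by
      intro v
      rw [PySem.Dict.getD_insert]
      unfold incF
      by_cases hvx : v = x <;> simp [hvx, ht x, ht v]
    have hcond : (taken.getD x 0 ≥ min (cc.getD x 0) (seen.getD x 0))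
        ↔ min (ccf x) (sef x) ≤ tf x := by
      rw [ht x, hcc x, hse x, ← Nat.cast_min]
      exact_mod_cast Iff.rfl
    by_cases h : min (ccf x) (sef x) ≤ tf x
    · rw [pyBKeep, if_pos (hcond.mpr h)]
      rw [ih (sv ++ [x]) _ (incF tf x) ht', keepRec, if_pos h]
      simp
    · rw [pyBKeep, if_neg (fun hge => h (hcond.mp hge))]
      rw [ih sv _ (incF tf x) ht', keepRec, if_neg h]
      simp

theorem curCount_getD (current : List String) (v : String) :
    (current.foldl (fun d x => d.insert x (d.getD x 0 + 1)) PySem.Dict.empty).getD v 0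
      = (current.count v : Int) := by
  rw [PySem.Dict.getD_foldl_insert_add_one]
  simp

-- ===== VERDICT (by name: the statement is the Claim_ definition above) =====
theorem compareOldAndNew_spec : Claim_equal_compareOldAndNew := by
  intro current update _
  unfold Spec_compareOldAndNew compareOldAndNew
  have hA := pyALoop_eq current update [] (fun _ => 0)
  rw [show (fun v => min (current.count v) ((fun _ => 0) v)) = (fun _ : String => 0) from
      funext (fun v => by simp), dropOcc_zero] at hA
  have hcc := curCount_getD current
  have hAdd := pyBAdd_eq _ (fun v => current.count v) hcc update []
      PySem.Dict.empty (fun _ => 0) (fun v => by simp)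
  have hBalt : compareOldAndNew_alt current update
      = ((pyBAdd (current.foldl (fun d x => d.insert x (d.getD x 0 + 1)) PySem.Dict.empty)
            [] PySem.Dict.empty update).1,
         pyBKeep (current.foldl (fun d x => d.insert x (d.getD x 0 + 1)) PySem.Dict.empty)
            (pyBAdd (current.foldl (fun d x => d.insert x (d.getD x 0 + 1)) PySem.Dict.empty)
              [] PySem.Dict.empty update).2 [] PySem.Dict.empty current) := rfl
  have hKeep := pyBKeep_eq _ _ (fun v => current.count v) (fun v => update.count v)
      hcc (fun v => by rw [hAdd.2 v]; simp) current [] PySem.Dict.empty (fun _ => 0)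
      (fun v => by simp)
  rw [hA, hBalt, hKeep]
  refine Prod.ext ?_ ?_
  · simpa using hAdd.1.symm
  · show dropOcc current (fun v => min (current.count v) (0 + update.count v)) = _
    rw [show (fun v => min (current.count v) (0 + update.count v))
        = (fun v => min (current.count v) (update.count v) - (fun _ : String => 0) v) from
        funext (fun v => by simp)]
    rw [dropOcc_eq_keepRec]
    simp
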